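-- pv_equiv track=rewrite | github.com/logsv/em-agentic-code-reviewer | diff_generator_agent.py | _parse_commit_diff
-- ===== SOURCE A (Python) =====
-- from typing import Dict, List, Optional, Tuple
--
-- def _parse_commit_diff(diff_output: str) -> Dict[str, str]:
--     """Parse commit diff output to separate files."""
--     diffs = {}
--     current_file = None
--     current_diff = []
--
--     for line in diff_output.split('\n'):
--         if line.startswith('diff --git'):
--             # Save previous file diff
--             if current_file and current_diff:
--                 diffs[current_file] = '\n'.join(current_diff)
--
--             # Start new file
--             parts = line.split()
--             if len(parts) >= 3:
--                 current_file = parts[2].replace('b/', '')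
--                 current_diff = [line]
--             else:
--                 current_file = None
--                 current_diff = []
--         elif current_file:
--             current_diff.append(line)
--
--     # Save last file diff
--     if current_file and current_diff:
--         diffs[current_file] = '\n'.join(current_diff)
--
--     return diffs
-- ===== SOURCE B (Python) =====
-- def _parse_commit_diff(diff_output: str):
--     """Parse commit diff output to separate files (block-splitting decomposition)."""
--     blocks = _split_blocks(diff_output.split('\n'))
--     diffs = {}
--     for block in blocks:
--         parts = block[0].split()
--         if len(parts) >= 3:
--             filename = parts[2].replace('b/', '')
--             if filename:
--                 diffs[filename] = '\n'.join(block)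
--     return diffs
--
--
-- def _split_blocks(lines):
--     """Split the line list into per-file blocks, each starting at a 'diff --git' header."""
--     # drop everything before the first header
--     while lines and not lines[0].startswith('diff --git'):
--         lines = lines[1:]
--     if not lines:
--         return []
--     k = 1
--     while k < len(lines) and not lines[k].startswith('diff --git'):
--         k += 1
--     return [lines[:k]] + _split_blocks(lines[k:])
-- ===== Notes on version B (the rewrite author's own statement) =====
-- stated objective: alternative
-- what changed: Replaces A's single stateful loop (current_file/current_diff accumulator with flush-on-header and trailing flush) by a two-phase decomposition: recursively split the line list into per-file blocks at 'diff --git' headers, then build the dict from each block's header in a separate pass.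
import Mathlib
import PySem

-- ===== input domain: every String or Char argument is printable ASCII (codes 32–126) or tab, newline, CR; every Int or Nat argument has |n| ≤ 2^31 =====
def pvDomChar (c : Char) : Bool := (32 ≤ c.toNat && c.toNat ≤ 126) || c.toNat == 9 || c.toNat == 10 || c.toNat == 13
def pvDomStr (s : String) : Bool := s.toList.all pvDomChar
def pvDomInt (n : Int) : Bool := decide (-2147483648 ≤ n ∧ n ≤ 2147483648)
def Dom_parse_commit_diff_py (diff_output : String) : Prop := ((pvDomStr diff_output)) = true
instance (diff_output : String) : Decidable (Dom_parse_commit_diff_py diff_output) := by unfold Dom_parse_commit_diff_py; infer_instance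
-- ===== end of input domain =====

-- B replaces A's single stateful accumulation loop with a two-phase decomposition
-- (split the lines into per-file blocks, then build the dict from the blocks); objective: alternative decomposition, same cost.

-- ===== PORT A =====

/-- `line.startswith('diff --git')` -/
def pvIsHeader (line : String) : Bool := PySem.Str.startswith line "diff --git"

/-- One iteration of A's `for line in …` loop; state = (diffs, current_file, current_diff).
    `current_file = None` ↦ `none`; a string `f` ↦ `some f` (Python truthiness = `f ≠ ""`). -/
def pvStepA (s : PySem.Dict String String × Option String × List String) (line : String) :
    PySem.Dict String String × Option String × List String :=
  let (diffs, current_file, current_diff) := s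
  if pvIsHeader line then
    -- save previous file diff
    let diffs :=
      match current_file with
      | some f => if f ≠ "" ∧ current_diff ≠ [] then diffs.insert f (PySem.Str.join "\n" current_diff) else diffs
      | none => diffs
    -- start new file
    let parts := PySem.Str.split₀ line
    if parts.length ≥ 3 then
      (diffs, some (PySem.Str.replace (parts.getD 2 "") "b/" ""), [line])
    else
      (diffs, none, [])
  else
    match current_file with
    | some f => if f ≠ "" then (diffs, current_file, current_diff ++ [line]) else (diffs, current_file, current_diff)
    | none => (diffs, current_file, current_diff)

/-- the trailing `if current_file and current_diff: diffs[current_file] = …` -/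
def pvFinishA (s : PySem.Dict String String × Option String × List String) : PySem.Dict String String :=
  let (diffs, current_file, current_diff) := s
  match current_file with
  | some f => if f ≠ "" ∧ current_diff ≠ [] then diffs.insert f (PySem.Str.join "\n" current_diff) else diffs
  | none => diffs

def parse_commit_diff_py (diff_output : String) : List (String × String) :=
  -- `diff_output.split('\n')`: separator is nonempty, so `split?` is `some`
  let lines := (PySem.Str.split? diff_output "\n").getD []
  (pvFinishA (lines.foldl pvStepA (PySem.Dict.empty, none, []))).items

-- ===== PORT B =====

/-- `_split_blocks`: drop the lines before the first header (the two `while` loops scan a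
    prefix, transcribed as `dropWhile`/`takeWhile`), then peel off one block per header. -/
def pvSplitBlocks : List String → List (List String)
  | [] => []
  | l :: ls =>
    if pvIsHeader l then
      (l :: ls.takeWhile (fun x => !pvIsHeader x)) :: pvSplitBlocks (ls.dropWhile (fun x => !pvIsHeader x))
    else
      pvSplitBlocks ls
termination_by ls => ls.length
decreasing_by
  · simpa using Nat.lt_succ_of_le (List.length_dropWhile_le _ _)
  · simp

/-- second phase: one dict entry per well-formed block -/
def pvStepB (diffs : PySem.Dict String String) (block : List String) : PySem.Dict String String :=
  let parts := PySem.Str.split₀ (block.getD 0 "")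
  if parts.length ≥ 3 then
    let filename := PySem.Str.replace (parts.getD 2 "") "b/" ""
    if filename ≠ "" then diffs.insert filename (PySem.Str.join "\n" block) else diffs
  else diffs

def parse_commit_diff_py_alt (diff_output : String) : List (String × String) :=
  let lines := (PySem.Str.split? diff_output "\n").getD []
  ((pvSplitBlocks lines).foldl pvStepB PySem.Dict.empty).items

-- ===== PRECONDITION & SPEC =====
def Spec_parse_commit_diff_py (diff_output : String) (out : List (String × String)) : Prop := out = parse_commit_diff_py_alt diff_output
instance (diff_output : String) (out : List (String × String)) : Decidable (Spec_parse_commit_diff_py diff_output out) := by unfold Spec_parse_commit_diff_py; infer_instance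

-- ===== CLAIM (what is proved, stated in full; the proofs are below) =====
def Claim_equal_parse_commit_diff_py : Prop := ∀ (diff_output : String), Dom_parse_commit_diff_py diff_output → Spec_parse_commit_diff_py diff_output (parse_commit_diff_py diff_output)

-- ===== LEMMAS AND PROOFS =====

/-- leading non-header lines contribute no block -/
lemma pvSplitBlocks_dropWhile (ls : List String) :
    pvSplitBlocks (ls.dropWhile (fun x => !pvIsHeader x)) = pvSplitBlocks ls := by
  induction ls with
  | nil => rfl
  | cons l ls ih =>
    by_cases h : pvIsHeader l
    · simp [List.dropWhile, h]
    · simp [List.dropWhile, h, pvSplitBlocks, ih]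

/-- unfolding `pvStepB` on a nonempty block -/
lemma pvStepB_cons (diffs : PySem.Dict String String) (l : String) (rest : List String) :
    pvStepB diffs (l :: rest) =
      (if (PySem.Str.split₀ l).length ≥ 3 then
        (if PySem.Str.replace ((PySem.Str.split₀ l).getD 2 "") "b/" "" = "" then diffs
         else diffs.insert (PySem.Str.replace ((PySem.Str.split₀ l).getD 2 "") "b/" "")
                (PySem.Str.join "\n" (l :: rest)))
       else diffs) := by
  simp only [pvStepB, List.getD_cons_zero]
  split_ifs <;> simp_all

/-- Main invariant, both loop states at once:
    (active) from state `(diffs, some f, cd)` with `f` truthy and `cd` nonempty, A finishes the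
    current block with the upcoming non-header lines and then proceeds like B on the remaining blocks;
    (idle) from state `(diffs, none, cd)` or `(diffs, some "", cd)`, A produces B's fold from `diffs`. -/
lemma pvMain (lines : List String) :
    (∀ (diffs : PySem.Dict String String) (f : String) (cd : List String), f ≠ "" → cd ≠ [] →
      pvFinishA (lines.foldl pvStepA (diffs, some f, cd)) =
        (pvSplitBlocks lines).foldl pvStepB
          (diffs.insert f (PySem.Str.join "\n" (cd ++ lines.takeWhile (fun x => !pvIsHeader x))))) ∧
    (∀ (diffs : PySem.Dict String String) (cf : Option String) (cd : List String),
      cf = none ∨ cf = some "" →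
      pvFinishA (lines.foldl pvStepA (diffs, cf, cd)) =
        (pvSplitBlocks lines).foldl pvStepB diffs) := by
  induction lines with
  | nil =>
    constructor
    · intro diffs f cd hf hcd
      simp [pvFinishA, pvSplitBlocks, hf, hcd]
    · rintro diffs cf cd (rfl | rfl) <;> simp [pvFinishA, pvSplitBlocks]
  | cons l ls ih =>
    obtain ⟨ihA, ihI⟩ := ih
    by_cases h : pvIsHeader l
    · -- header line: the active block (if any) is flushed, then a new block starts
      have hblocks : pvSplitBlocks (l :: ls) =
          (l :: ls.takeWhile (fun x => !pvIsHeader x)) :: pvSplitBlocks ls := by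
        rw [pvSplitBlocks, if_pos h, pvSplitBlocks_dropWhile]
      -- how A continues from any flushed dict `d` after consuming the header `l`,
      -- compared with B's fold from `pvStepB d (l :: takeWhile …)`:
      have key : ∀ d : PySem.Dict String String,
          pvFinishA (ls.foldl pvStepA
            (if (PySem.Str.split₀ l).length ≥ 3 then
              (d, some (PySem.Str.replace ((PySem.Str.split₀ l).getD 2 "") "b/" ""), [l])
             else (d, none, []))) =
          (pvSplitBlocks ls).foldl pvStepB
            (pvStepB d (l :: ls.takeWhile (fun x => !pvIsHeader x))) := by
        intro d
        rw [pvStepB_cons]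
        by_cases hp : (PySem.Str.split₀ l).length ≥ 3
        · rw [if_pos hp, if_pos hp]
          by_cases hne : PySem.Str.replace ((PySem.Str.split₀ l).getD 2 "") "b/" "" = ""
          · rw [if_pos hne, hne, ihI d (some "") [l] (Or.inr rfl)]
          · rw [if_neg hne, ihA d _ [l] hne (by simp)]
            simp
        · rw [if_neg hp, if_neg hp, ihI d none [] (Or.inl rfl)]
      constructor
      · intro diffs f cd hf hcd
        have hstep : pvStepA (diffs, some f, cd) l =
            (if (PySem.Str.split₀ l).length ≥ 3 then
              (diffs.insert f (PySem.Str.join "\n" cd),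
               some (PySem.Str.replace ((PySem.Str.split₀ l).getD 2 "") "b/" ""), [l])
             else (diffs.insert f (PySem.Str.join "\n" cd), none, [])) := by
          simp [pvStepA, h, hf, hcd]
        have htw : (l :: ls).takeWhile (fun x => !pvIsHeader x) = [] := by
          simp [List.takeWhile, h]
        rw [htw, List.append_nil, hblocks, List.foldl_cons, List.foldl_cons, hstep,
          key (diffs.insert f (PySem.Str.join "\n" cd))]
      · rintro diffs cf cd hcf
        have hstep : pvStepA (diffs, cf, cd) l =
            (if (PySem.Str.split₀ l).length ≥ 3 then
              (diffs, some (PySem.Str.replace ((PySem.Str.split₀ l).getD 2 "") "b/" ""), [l])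
             else (diffs, none, [])) := by
          rcases hcf with rfl | rfl <;> simp [pvStepA, h]
        rw [hblocks, List.foldl_cons, List.foldl_cons, hstep, key diffs]
    · -- non-header line
      constructor
      · intro diffs f cd hf hcd
        have hstep : pvStepA (diffs, some f, cd) l = (diffs, some f, cd ++ [l]) := by
          simp [pvStepA, h, hf]
        rw [List.foldl_cons, hstep, ihA diffs f (cd ++ [l]) hf (by simp)]
        have hb : pvSplitBlocks (l :: ls) = pvSplitBlocks ls := by
          rw [pvSplitBlocks, if_neg h]
        rw [hb]
        congr 2
        simp [List.takeWhile, h]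
      · rintro diffs cf cd hcf
        have hstep : pvStepA (diffs, cf, cd) l = (diffs, cf, cd) := by
          rcases hcf with rfl | rfl <;> simp [pvStepA, h]
        rw [List.foldl_cons, hstep, ihI diffs cf cd hcf]
        rw [pvSplitBlocks, if_neg h]

-- ===== VERDICT (by name: the statement is the Claim_ definition above) =====
theorem parse_commit_diff_py_spec : Claim_equal_parse_commit_diff_py := by
  intro diff_output _
  show parse_commit_diff_py diff_output = parse_commit_diff_py_alt diff_output
  show (pvFinishA (((PySem.Str.split? diff_output "\n").getD []).foldl pvStepA (PySem.Dict.empty, none, []))).items =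
    ((pvSplitBlocks ((PySem.Str.split? diff_output "\n").getD [])).foldl pvStepB PySem.Dict.empty).items
  rw [(pvMain ((PySem.Str.split? diff_output "\n").getD [])).2 PySem.Dict.empty none [] (Or.inl rfl)]
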